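-- pv_equiv track=rewrite | github.com/fruchti/ag3 | walfang/walfang.py | sonar
-- ===== SOURCE A (Python) =====
-- def dist(a, b):
--     return abs(a[0] - b[0]) + abs(a[1] - b[1])
--
-- def sonar(wal, schiff, groesse):
--     dst = dist(wal, schiff)
--     d = []
--     for y in range(0, groesse):
--         d.append([])
--         for x in range(0, groesse):
--             d[y].append(1 if dst == dist(schiff, [x, y]) else 0)
--
--     return d
-- ===== SOURCE B (Python) =====
-- def sonar(wal, schiff, groesse):
--     sx, sy = schiff[0], schiff[1]
--     dst = abs(wal[0] - sx) + abs(wal[1] - sy)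
--     d = [[0] * groesse for _ in range(groesse)]
--     for x in range(max(0, sx - dst), min(groesse, sx + dst + 1)):
--         dy = dst - abs(x - sx)
--         for y in (sy + dy, sy - dy):
--             if 0 <= y < groesse:
--                 d[y][x] = 1
--     return d
-- ===== Notes on version B (the rewrite author's own statement) =====
-- stated objective: faster
-- what changed: Instead of scanning all groesse*groesse cells and computing the Manhattan distance at each, B allocates a zero grid in bulk ([0]*groesse) and enumerates only the O(dst) points of the distance-dst diamond, setting the in-bounds ones to 1.
import Mathlib
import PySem

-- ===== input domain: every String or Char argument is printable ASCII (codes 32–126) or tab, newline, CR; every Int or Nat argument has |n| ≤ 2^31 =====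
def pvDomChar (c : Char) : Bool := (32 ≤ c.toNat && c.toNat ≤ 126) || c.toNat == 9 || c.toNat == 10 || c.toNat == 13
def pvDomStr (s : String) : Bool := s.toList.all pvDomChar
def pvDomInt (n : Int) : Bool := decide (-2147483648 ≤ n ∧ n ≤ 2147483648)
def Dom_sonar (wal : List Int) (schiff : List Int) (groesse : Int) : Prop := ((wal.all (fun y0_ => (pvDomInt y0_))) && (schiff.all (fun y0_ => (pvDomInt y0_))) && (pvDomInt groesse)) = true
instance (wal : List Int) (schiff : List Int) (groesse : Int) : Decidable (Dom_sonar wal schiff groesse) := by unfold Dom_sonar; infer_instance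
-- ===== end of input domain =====

-- B replaces the full-grid per-cell distance scan by bulk zero rows plus direct
-- enumeration of the O(dst) diamond points (objective: faster by a constant factor).


-- ===== PORT A =====
-- dist(a, b) = abs(a[0]-b[0]) + abs(a[1]-b[1]); pyGetD is exact under Pre_ (both lists have ≥ 2 elements)
def distI (a : List Int) (b : List Int) : Int :=
  |PySem.List.pyGetD a 0 0 - PySem.List.pyGetD b 0 0| + |PySem.List.pyGetD a 1 0 - PySem.List.pyGetD b 1 0|

def sonar (wal : List Int) (schiff : List Int) (groesse : Int) : List (List Int) :=
  let dst := distI wal schiff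
  (PySem.List.pyRange 0 groesse 1).map (fun y =>
    (PySem.List.pyRange 0 groesse 1).map (fun x =>
      if dst = distI schiff [x, y] then 1 else 0))

-- ===== PORT B =====
-- inner loop body: 'if 0 <= y < groesse: d[y][x] = 1' — y bound checked, x is in range by the loop bounds
def mark2 (groesse : Int) (d : List (List Int)) (x : Int) (y : Int) : List (List Int) :=
  if 0 ≤ y ∧ y < groesse then d.set y.toNat ((d.getD y.toNat []).set x.toNat 1) else d

def sonar_alt (wal : List Int) (schiff : List Int) (groesse : Int) : List (List Int) :=
  let sx := PySem.List.pyGetD schiff 0 0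
  let sy := PySem.List.pyGetD schiff 1 0
  let dst := |PySem.List.pyGetD wal 0 0 - sx| + |PySem.List.pyGetD wal 1 0 - sy|
  let d0 := List.replicate groesse.toNat (List.replicate groesse.toNat (0 : Int))
  (PySem.List.pyRange (max 0 (sx - dst)) (min groesse (sx + dst + 1)) 1).foldl
    (fun d x =>
      mark2 groesse (mark2 groesse d x (sy + (dst - |x - sx|))) x (sy - (dst - |x - sx|))) d0

-- ===== PRECONDITION & SPEC =====
-- Pre_ excludes exactly the inputs where A raises IndexError: wal or schiff shorter than 2 elements.
def Pre_sonar (wal : List Int) (schiff : List Int) (groesse : Int) : Prop :=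
  2 ≤ wal.length ∧ 2 ≤ schiff.length
instance (wal : List Int) (schiff : List Int) (groesse : Int) : Decidable (Pre_sonar wal schiff groesse) := by unfold Pre_sonar; infer_instance
def pvWitness_sonar : List Int × List Int × Int := ([0, 0], [1, 1], 3)

def Spec_sonar (wal : List Int) (schiff : List Int) (groesse : Int) (out : List (List Int)) : Prop := out = sonar_alt wal schiff groesse
instance (wal : List Int) (schiff : List Int) (groesse : Int) (out : List (List Int)) : Decidable (Spec_sonar wal schiff groesse out) := by unfold Spec_sonar; infer_instance

-- ===== CLAIM (what is proved, stated in full; the proofs are below) =====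
def Claim_equal_sonar : Prop := ∀ (wal : List Int) (schiff : List Int) (groesse : Int), Dom_sonar wal schiff groesse → Pre_sonar wal schiff groesse → Spec_sonar wal schiff groesse (sonar wal schiff groesse)

-- ===== LEMMAS AND PROOFS =====

-- proof-side generic single-point marker (mark2 with the x-bounds check made explicit)
def mark (groesse : Int) (d : List (List Int)) (p : Int × Int) : List (List Int) :=
  if 0 ≤ p.1 ∧ p.1 < groesse ∧ 0 ≤ p.2 ∧ p.2 < groesse then
    d.set p.2.toNat ((d.getD p.2.toNat []).set p.1.toNat 1)
  else d

-- cell accessor used only in proofs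
def get2 (g : List (List Int)) (y x : Nat) : Int := (g.getD y []).getD x 0

theorem mark2_eq_mark (gro : Int) (d : List (List Int)) (x y : Int)
    (h1 : 0 ≤ x) (h2 : x < gro) : mark2 gro d x y = mark gro d (x, y) := by
  unfold mark2 mark
  split_ifs with ha hb hb
  · rfl
  · exact absurd ⟨h1, h2, ha.1, ha.2⟩ hb
  · exact absurd ⟨hb.2.2.1, hb.2.2.2⟩ ha
  · rfl

theorem foldl2_eq (gro : Int) (L : List Int) (f g : Int → Int)
    (hL : ∀ x ∈ L, 0 ≤ x ∧ x < gro) (d : List (List Int)) :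
    L.foldl (fun d x => mark2 gro (mark2 gro d x (f x)) x (g x)) d
      = (L.flatMap (fun x => [(x, f x), (x, g x)])).foldl (mark gro) d := by
  induction L generalizing d with
  | nil => rfl
  | cons a L ih =>
    obtain ⟨ha1, ha2⟩ := hL a (List.mem_cons_self ..)
    rw [List.foldl_cons, List.flatMap_cons, List.foldl_append, List.foldl_cons, List.foldl_cons,
      List.foldl_nil, mark2_eq_mark gro d a (f a) ha1 ha2,
      mark2_eq_mark gro _ a (g a) ha1 ha2]
    exact ih (fun x hx => hL x (List.mem_cons_of_mem a hx)) _

-- grid shape invariant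
def GridInv (n : Nat) (g : List (List Int)) : Prop :=
  g.length = n ∧ ∀ j < n, (g.getD j []).length = n

theorem getD_set (g : List (List Int)) (i j : Nat) (r : List Int) :
    (g.set i r).getD j [] = if i = j ∧ j < g.length then r else g.getD j [] := by
  simp only [List.getD, List.getElem?_set]
  split_ifs with h1 h2 h3 h3 <;>
    first | rfl | omega | (rw [List.getElem?_eq_none (by omega)]; rfl) | (rw [List.getElem?_eq_none (by omega)])

theorem mark_GridInv (n : Nat) (gro : Int) (hgro : gro = (n : Int)) (d : List (List Int))
    (p : Int × Int) (h : GridInv n d) : GridInv n (mark gro d p) := by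
  obtain ⟨h1, h2⟩ := h
  unfold mark
  split
  · refine ⟨by simp [h1], ?_⟩
    intro j hj
    rw [getD_set]
    split_ifs with hif
    · rename_i hc
      simp only [List.length_set]
      exact h2 p.2.toNat (by omega)
    · exact h2 j hj
  · exact ⟨h1, h2⟩

theorem foldl_mark_GridInv (n : Nat) (gro : Int) (hgro : gro = (n : Int))
    (pts : List (Int × Int)) (g : List (List Int)) (h : GridInv n g) :
    GridInv n (pts.foldl (mark gro) g) := by
  induction pts generalizing g with
  | nil => exact h
  | cons p rest ih => exact ih _ (mark_GridInv n gro hgro g p h)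

theorem get2_mark (n : Nat) (gro : Int) (hgro : gro = (n : Int)) (d : List (List Int))
    (p : Int × Int) (hInv : GridInv n d) (y x : Nat) (hy : y < n) (hx : x < n) :
    get2 (mark gro d p) y x = if p.1 = (x : Int) ∧ p.2 = (y : Int) then 1 else get2 d y x := by
  obtain ⟨h1, h2⟩ := hInv
  unfold mark get2
  split
  · rename_i hc
    obtain ⟨hx1, hx2, hy1, hy2⟩ := hc
    rw [getD_set]
    by_cases hyeq : p.2 = (y : Int)
    · have hyt : p.2.toNat = y := by omega
      rw [if_pos ⟨hyt, by omega⟩]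
      by_cases hxeq : p.1 = (x : Int)
      · have hxt : p.1.toNat = x := by omega
        rw [if_pos ⟨hxeq, hyeq⟩, hyt, hxt]
        have hrow : (d.getD y []).length = n := h2 y hy
        have hlt : x < (d.getD y []).length := by omega
        simp only [List.getD_eq_getElem?_getD] at hlt ⊢
        rw [List.getElem?_set_self hlt]
        rfl
      · rw [if_neg (by tauto), hyt]
        have hxt : p.1.toNat ≠ x := by omega
        simp only [List.getD_eq_getElem?_getD]
        rw [List.getElem?_set_ne hxt]
    · rw [if_neg (by omega), if_neg (by omega)]
  · rename_i hc
    rw [if_neg]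
    rintro ⟨e1, e2⟩
    exact hc ⟨by omega, by omega, by omega, by omega⟩

theorem get2_foldl_mark (n : Nat) (gro : Int) (hgro : gro = (n : Int))
    (pts : List (Int × Int)) (g : List (List Int)) (hInv : GridInv n g)
    (y x : Nat) (hy : y < n) (hx : x < n) :
    get2 (pts.foldl (mark gro) g) y x =
      if (∃ p ∈ pts, p.1 = (x : Int) ∧ p.2 = (y : Int)) then 1 else get2 g y x := by
  induction pts generalizing g with
  | nil => simp
  | cons p rest ih =>
    rw [List.foldl_cons, ih (mark gro g p) (mark_GridInv n gro hgro g p hInv)]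
    rw [get2_mark n gro hgro g p hInv y x hy hx]
    by_cases hrest : (∃ q ∈ rest, q.1 = (x : Int) ∧ q.2 = (y : Int))
    · obtain ⟨q, hq, hqe⟩ := hrest
      rw [if_pos ⟨q, hq, hqe⟩, if_pos ⟨q, List.mem_cons_of_mem p hq, hqe⟩]
    · rw [if_neg hrest]
      by_cases hp : p.1 = (x : Int) ∧ p.2 = (y : Int)
      · rw [if_pos hp, if_pos ⟨p, List.mem_cons_self .., hp⟩]
      · rw [if_neg hp, if_neg]
        rintro ⟨q, hq, hqe⟩
        rw [List.mem_cons] at hq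
        rcases hq with h | h
        · exact hp (h ▸ hqe)
        · exact hrest ⟨q, h, hqe⟩

-- the clipped diamond enumeration hits exactly the in-grid cells at Manhattan distance dst
theorem hit_iff (sx sy dst gro : Int) (hdst : 0 ≤ dst) (x y : Int)
    (hx0 : 0 ≤ x) (hxg : x < gro) :
    (∃ p ∈ (PySem.List.pyRange (max 0 (sx - dst)) (min gro (sx + dst + 1)) 1).flatMap
        (fun xx => [(xx, sy + (dst - |xx - sx|)), (xx, sy - (dst - |xx - sx|))]),
      p.1 = x ∧ p.2 = y) ↔ dst = |sx - x| + |sy - y| := by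
  simp only [List.mem_flatMap, PySem.List.mem_pyRange_one, List.mem_cons,
    List.not_mem_nil, or_false]
  constructor
  · rintro ⟨p, ⟨xx, ⟨hl, hr⟩, hp⟩, he1, he2⟩
    rcases hp with hp | hp <;> subst hp <;>
      simp only at he1 he2 <;>
      rcases abs_cases (xx - sx) with ⟨a1, a2⟩ | ⟨a1, a2⟩ <;>
      rcases abs_cases (sx - x) with ⟨b1, b2⟩ | ⟨b1, b2⟩ <;>
      rcases abs_cases (sy - y) with ⟨c1, c2⟩ | ⟨c1, c2⟩ <;> omega
  · intro h
    have hd : dst - |x - sx| = |sy - y| := by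
      rcases abs_cases (x - sx) with ⟨a1, a2⟩ | ⟨a1, a2⟩ <;>
        rcases abs_cases (sx - x) with ⟨b1, b2⟩ | ⟨b1, b2⟩ <;>
        rcases abs_cases (sy - y) with ⟨c1, c2⟩ | ⟨c1, c2⟩ <;> omega
    have hb : max 0 (sx - dst) ≤ x ∧ x < min gro (sx + dst + 1) := by
      rcases abs_cases (x - sx) with ⟨a1, a2⟩ | ⟨a1, a2⟩ <;>
        rcases abs_cases (sx - x) with ⟨b1, b2⟩ | ⟨b1, b2⟩ <;>
        rcases abs_cases (sy - y) with ⟨c1, c2⟩ | ⟨c1, c2⟩ <;>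
        constructor <;> omega
    refine ⟨(x, y), ⟨x, hb, ?_⟩, rfl, rfl⟩
    rcases abs_cases (sy - y) with ⟨c1, _⟩ | ⟨c1, _⟩
    · right
      have : sy - (dst - |x - sx|) = y := by omega
      simp [this]
    · left
      have : sy + (dst - |x - sx|) = y := by omega
      simp [this]

-- ===== VERDICT (by name: the statement is the Claim_ definition above) =====
theorem sonar_spec : Claim_equal_sonar := by
  intro wal schiff gro hdom hpre
  show sonar wal schiff gro = sonar_alt wal schiff gro
  unfold sonar sonar_alt
  simp only []
  set sx := PySem.List.pyGetD schiff 0 0 with hsx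
  set sy := PySem.List.pyGetD schiff 1 0 with hsy
  set dst := |PySem.List.pyGetD wal 0 0 - sx| + |PySem.List.pyGetD wal 1 0 - sy| with hdstdef
  have hdst : 0 ≤ dst := by positivity
  have hdistE : ∀ x y : Int, distI schiff [x, y] = |sx - x| + |sy - y| := by
    intro x y
    simp [distI, hsx, hsy, PySem.List.pyGetD, PySem.List.pyGet?, PySem.List.pyIdx?]
  rw [foldl2_eq gro _ _ _
    (fun x hx => by
      rw [PySem.List.mem_pyRange_one] at hx
      exact ⟨le_trans (le_max_left _ _) hx.1, lt_of_lt_of_le hx.2 (min_le_left _ _)⟩)]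
  by_cases hg : gro ≤ 0
  · rw [PySem.List.pyRange_one_eq_nil hg]
    rw [PySem.List.pyRange_one_eq_nil
      (le_trans (min_le_left gro _) (le_trans hg (le_max_left 0 _)))]
    have : gro.toNat = 0 := by omega
    simp [this]
  · set n := gro.toNat with hn
    have hgro : gro = (n : Int) := by omega
    set d0 := List.replicate gro.toNat (List.replicate gro.toNat (0 : Int)) with hd0
    set pts := (PySem.List.pyRange (max 0 (sx - dst)) (min gro (sx + dst + 1)) 1).flatMap
      (fun x => [(x, sy + (dst - |x - sx|)), (x, sy - (dst - |x - sx|))]) with hptsdef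
    have hInv0 : GridInv n d0 := by
      refine ⟨by simp [hd0, hn], ?_⟩
      intro j hj
      rw [hd0, List.getD_eq_getElem?_getD, List.getElem?_replicate,
        if_pos (show j < gro.toNat by omega)]
      simp [hn]
    obtain ⟨hlenF, hrowF⟩ := foldl_mark_GridInv n gro hgro pts d0 hInv0
    apply List.ext_getElem
    · rw [List.length_map, PySem.List.length_pyRange_one, hlenF]; omega
    · intro y h1 h2
      have hy : y < n := by rw [hlenF] at h2; exact h2
      have hYlt : y < (pts.foldl (mark gro) d0).length := by omega
      have hr := hrowF y hy
      rw [List.getD_eq_getElem (hn := hYlt)] at hr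
      rw [List.getElem_map]
      apply List.ext_getElem
      · rw [List.length_map, PySem.List.length_pyRange_one, hr]; omega
      · intro x h3 h4
        have hx : x < n := by rw [hr] at h4; exact h4
        -- A's entry
        rw [List.getElem_map, PySem.List.getElem_pyRange_one, PySem.List.getElem_pyRange_one]
        -- B's entry
        have hB := get2_foldl_mark n gro hgro pts d0 hInv0 y x hy hx
        unfold get2 at hB
        rw [List.getD_eq_getElem (hn := hYlt),
            List.getD_eq_getElem (hn := by rw [hr]; exact hx)] at hB
        have hzero : (d0.getD y []).getD x 0 = 0 := by
          rw [hd0]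
          simp only [List.getD_eq_getElem?_getD, List.getElem?_replicate]
          split_ifs <;> simp
        rw [hzero] at hB
        rw [hB, hptsdef]
        simp only [hit_iff sx sy dst gro hdst _ _ (by omega : (0:Int) ≤ (x:Int)) (by omega : (x:Int) < gro)]
        rw [show distI wal schiff = dst from rfl, hdistE]
        simp only [zero_add]
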